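-- pv_equiv track=rewrite | github.com/ThUnD3r-Gr33n/homeassistant-core | script/hassfest/mypy_config.py | _sort_within_sections
-- ===== SOURCE A (Python) =====
-- from collections.abc import Iterable
--
-- def _sort_within_sections(line_iter: Iterable[str]) -> Iterable[str]:
--     """Sort lines within sections.
--
--     Sections are defined as anything not delimited by a blank line
--     or an octothorpe-prefixed comment line.
--     """
--     section: list[str] = []
--     for line in line_iter:
--         if line.startswith("#") or not line.strip():
--             yield from sorted(section)
--             section.clear()
--             yield line
--             continue
--         section.append(line)
--     yield from sorted(section)
-- ===== SOURCE B (Python) =====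
-- from collections.abc import Iterable
-- from itertools import groupby
--
-- def _sort_within_sections(line_iter: Iterable[str]) -> Iterable[str]:
--     """Sort lines within blank/comment-delimited sections (groupby-based)."""
--     is_delim = lambda line: line.startswith("#") or not line.strip()
--     for delim, group in groupby(line_iter, key=is_delim):
--         if delim:
--             yield from group
--         else:
--             yield from sorted(group)
-- ===== Notes on version B (the rewrite author's own statement) =====
-- stated objective: idiomatic
-- what changed: Replaced the manual accumulate-and-flush loop with itertools.groupby keyed on the delimiter predicate, yielding delimiter groups as-is and sorting each section group.
import Mathlib
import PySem

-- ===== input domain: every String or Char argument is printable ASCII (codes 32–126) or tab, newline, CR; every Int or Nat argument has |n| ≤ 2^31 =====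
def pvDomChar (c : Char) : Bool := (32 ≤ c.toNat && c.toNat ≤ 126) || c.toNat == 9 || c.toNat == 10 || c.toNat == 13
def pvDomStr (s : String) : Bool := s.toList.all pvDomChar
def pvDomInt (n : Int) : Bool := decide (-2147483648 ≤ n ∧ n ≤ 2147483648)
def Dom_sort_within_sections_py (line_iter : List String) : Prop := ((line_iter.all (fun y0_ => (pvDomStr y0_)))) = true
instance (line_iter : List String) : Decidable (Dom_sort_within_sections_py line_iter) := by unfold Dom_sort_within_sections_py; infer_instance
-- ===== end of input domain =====

-- B restructures A's accumulate-and-flush loop as a groupby over the delimiter predicate; same results, no speed claim.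

-- ===== PORT A =====
-- the delimiter test: line.startswith("#") or not line.strip()
def pvIsDelim (line : String) : Bool :=
  PySem.Str.startswith line "#" || !(decide (PySem.Str.strip line ≠ ""))

-- A's generator loop with the running `section` accumulator
def pvGoA (lines : List String) (sec : List String) : List String :=
  match lines with
  | [] => PySem.List.sorted sec (fun x => x) false
  | line :: rest =>
    if pvIsDelim line then
      PySem.List.sorted sec (fun x => x) false ++ line :: pvGoA rest []
    else
      pvGoA rest (sec ++ [line])

def sort_within_sections_py (line_iter : List String) : List String :=
  pvGoA line_iter []

-- ===== PORT B =====
-- B's key lambda: line.startswith("#") or not line.strip()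
def pvKeyB (line : String) : Bool :=
  PySem.Str.startswith line "#" || !(decide (PySem.Str.strip line ≠ ""))

-- itertools.groupby(line_iter, key=pvKeyB): maximal runs of equal key, in order
def pvGroupBy (lines : List String) : List (Bool × List String) :=
  match lines with
  | [] => []
  | x :: xs =>
    match pvGroupBy xs with
    | [] => [(pvKeyB x, [x])]
    | (k, g) :: rest =>
      if pvKeyB x == k then (k, x :: g) :: rest
      else (pvKeyB x, [x]) :: (k, g) :: rest

def sort_within_sections_py_alt (line_iter : List String) : List String :=
  (pvGroupBy line_iter).flatMap
    (fun p => if p.1 then p.2 else PySem.List.sorted p.2 (fun x => x) false)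

-- ===== PRECONDITION & SPEC =====
def Spec_sort_within_sections_py (line_iter : List String) (out : List String) : Prop := out = sort_within_sections_py_alt line_iter
instance (line_iter : List String) (out : List String) : Decidable (Spec_sort_within_sections_py line_iter out) := by unfold Spec_sort_within_sections_py; infer_instance

-- ===== CLAIM (what is proved, stated in full; the proofs are below) =====
def Claim_equal_sort_within_sections_py : Prop := ∀ (line_iter : List String), Dom_sort_within_sections_py line_iter → Spec_sort_within_sections_py line_iter (sort_within_sections_py line_iter)

-- ===== LEMMAS AND PROOFS =====

-- flatten of groups, as in B
def pvFlat (gs : List (Bool × List String)) : List String :=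
  gs.flatMap (fun p => if p.1 then p.2 else PySem.List.sorted p.2 (fun x => x) false)

-- A's pending accumulator prepended onto the group list
def pvConsAcc (sec : List String) (gs : List (Bool × List String)) : List (Bool × List String) :=
  match gs with
  | (false, g) :: rest => (false, sec ++ g) :: rest
  | _ => (false, sec) :: gs

theorem pvKeyB_eq : pvKeyB = pvIsDelim := rfl

theorem pvSortedNil : PySem.List.sorted ([] : List String) (fun x => x) false = [] := rfl

theorem pvGoA_eq (lines : List String) : ∀ (sec : List String),
    pvGoA lines sec = pvFlat (pvConsAcc sec (pvGroupBy lines)) := by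
  induction lines with
  | nil =>
    intro sec
    simp [pvGoA, pvGroupBy, pvConsAcc, pvFlat, pvSortedNil]
  | cons x xs ih =>
    intro sec
    by_cases hx : pvIsDelim x
    · cases hgs : pvGroupBy xs with
      | nil =>
        simp [pvGoA, pvGroupBy, pvKeyB_eq, hx, hgs, pvConsAcc, pvFlat, ih, pvSortedNil]
      | cons p rest =>
        obtain ⟨k, g⟩ := p
        cases k
        · simp [pvGoA, pvGroupBy, pvKeyB_eq, hx, hgs, pvConsAcc, pvFlat, ih, pvSortedNil]
        · simp [pvGoA, pvGroupBy, pvKeyB_eq, hx, hgs, pvConsAcc, pvFlat, ih, pvSortedNil]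
    · cases hgs : pvGroupBy xs with
      | nil =>
        simp [pvGoA, pvGroupBy, pvKeyB_eq, hx, hgs, pvConsAcc, pvFlat, ih, pvSortedNil]
      | cons p rest =>
        obtain ⟨k, g⟩ := p
        cases k
        · simp [pvGoA, pvGroupBy, pvKeyB_eq, hx, hgs, pvConsAcc, pvFlat, ih, pvSortedNil]
        · simp [pvGoA, pvGroupBy, pvKeyB_eq, hx, hgs, pvConsAcc, pvFlat, ih, pvSortedNil]

theorem pvConsAcc_nil (gs : List (Bool × List String)) :
    pvFlat (pvConsAcc [] gs) = pvFlat gs := by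
  cases gs with
  | nil => simp [pvConsAcc, pvFlat, pvSortedNil]
  | cons p rest =>
    obtain ⟨k, g⟩ := p
    cases k <;> simp [pvConsAcc, pvFlat, pvSortedNil]

-- ===== VERDICT (by name: the statement is the Claim_ definition above) =====
theorem sort_within_sections_py_spec : Claim_equal_sort_within_sections_py := by
  intro line_iter _
  show sort_within_sections_py line_iter = sort_within_sections_py_alt line_iter
  rw [sort_within_sections_py, pvGoA_eq, pvConsAcc_nil]
  rfl
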